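-- pv_equiv track=rewrite | github.com/afortunado-aceptado/Rudra | main/agent.py | msgs2text
-- ===== SOURCE A (Python) =====
-- def msgs2text(msgs):
--     multi_turn = False
--     for i in range(1, len(msgs)+1):
--         if msgs[len(msgs)-i]["role"] == "assistant":
--             multi_turn = True
--             start_idx = len(msgs)-i + 1
--             break
--     if not multi_turn:
--         return "\n".join([v["content"] for v in msgs])
--     else:
--         return "\n".join([v["content"] for v in msgs[start_idx:]])
-- ===== SOURCE B (Python) =====
-- def msgs2text(msgs):
--     start = 0
--     for i, m in enumerate(msgs):
--         if m.get("role") == "assistant":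
--             start = i + 1
--     return "\n".join(m["content"] for m in msgs[start:])
-- ===== Notes on version B (the rewrite author's own statement) =====
-- stated objective: simpler
-- what changed: Replaces the backward index scan with a boolean flag and early break by a single forward pass that tracks the index just past the last 'assistant' message, then joins the tail slice.
import Mathlib
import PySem

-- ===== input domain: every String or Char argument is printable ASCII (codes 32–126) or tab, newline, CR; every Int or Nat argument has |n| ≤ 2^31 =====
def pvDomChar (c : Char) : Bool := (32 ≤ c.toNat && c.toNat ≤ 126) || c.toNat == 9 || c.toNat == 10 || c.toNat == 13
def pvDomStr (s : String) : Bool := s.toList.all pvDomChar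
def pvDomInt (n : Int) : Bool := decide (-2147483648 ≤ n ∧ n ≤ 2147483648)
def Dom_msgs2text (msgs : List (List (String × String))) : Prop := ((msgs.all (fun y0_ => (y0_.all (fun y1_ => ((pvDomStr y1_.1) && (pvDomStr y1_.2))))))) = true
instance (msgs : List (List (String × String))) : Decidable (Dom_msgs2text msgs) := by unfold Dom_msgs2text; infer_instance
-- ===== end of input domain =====

-- B computes the same result by one forward pass tracking the index just past the
-- last 'assistant' message, instead of A's backward scan with break; objective: simpler.

-- ===== PORT A =====
-- the 'for i in range(1, len(msgs)+1): … break' search: returns some start_idx on the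
-- first (backward) assistant hit, none when the loop falls through.
-- Pre_ guarantees the "role"/"content" keys are present, so the getD defaults are never read.
def msgs2textScan (msgs : List (List (String × String))) (i : Nat) : Option Nat :=
  if i ≤ msgs.length then
    if PySem.Dict.getD ⟨msgs.getD (msgs.length - i) []⟩ "role" "" == "assistant" then
      some (msgs.length - i + 1)
    else msgs2textScan msgs (i + 1)
  else none
termination_by msgs.length + 1 - i
decreasing_by omega

def msgs2text (msgs : List (List (String × String))) : String :=
  match msgs2textScan msgs 1 with
  | none => PySem.Str.join "\n" (msgs.map (fun v => PySem.Dict.getD ⟨v⟩ "content" ""))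
  | some startIdx =>
      PySem.Str.join "\n"
        ((PySem.List.slice msgs (some (startIdx : Int)) none).map
          (fun v => PySem.Dict.getD ⟨v⟩ "content" ""))

-- ===== PORT B =====
def msgs2text_alt (msgs : List (List (String × String))) : String :=
  let start : Int :=
    (PySem.List.enumerate msgs 0).foldl
      (fun st p => if PySem.Dict.getD ⟨p.2⟩ "role" "" == "assistant" then p.1 + 1 else st) 0
  PySem.Str.join "\n"
    ((PySem.List.slice msgs (some start) none).map
      (fun v => PySem.Dict.getD ⟨v⟩ "content" ""))

-- ===== PRECONDITION & SPEC =====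
-- lookup helpers used by Pre_/Raises_ (first-match dict lookup on the j-th message)
def roleAt (msgs : List (List (String × String))) (j : Nat) : Option String :=
  PySem.Dict.get? ⟨msgs.getD j []⟩ "role"
def contentAt (msgs : List (List (String × String))) (j : Nat) : Option String :=
  PySem.Dict.get? ⟨msgs.getD j []⟩ "content"

-- Pre_ is A's exact domain: every message with no 'assistant' strictly after it is reached
-- by A's backward scan, so it needs a "role" key, and (unless it is itself the last
-- assistant) it gets joined, so it needs a "content" key; elsewhere Python raises KeyError.
def Pre_msgs2text (msgs : List (List (String × String))) : Prop :=
  ∀ j ∈ List.range msgs.length,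
    (∀ k ∈ List.range msgs.length, j < k → roleAt msgs k ≠ some "assistant") →
    ((roleAt msgs j).isSome = true ∧
     (roleAt msgs j ≠ some "assistant" → (contentAt msgs j).isSome = true))
instance (msgs : List (List (String × String))) : Decidable (Pre_msgs2text msgs) := by
  unfold Pre_msgs2text; infer_instance

def pvWitness_msgs2text : (List (List (String × String))) :=
  [[("role", "user"), ("content", "hi")],
   [("role", "assistant"), ("content", "hello")],
   [("role", "user"), ("content", "bye")]]

def Spec_msgs2text (msgs : List (List (String × String))) (out : String) : Prop := out = msgs2text_alt msgs
instance (msgs : List (List (String × String))) (out : String) : Decidable (Spec_msgs2text msgs out) := by unfold Spec_msgs2text; infer_instance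

-- ===== CLAIM (what is proved, stated in full; the proofs are below) =====
def Claim_equal_msgs2text : Prop := ∀ (msgs : List (List (String × String))), Dom_msgs2text msgs → Pre_msgs2text msgs → Spec_msgs2text msgs (msgs2text msgs)

-- ===== LEMMAS AND PROOFS =====

-- B's running last-seen-index fold, named for the proofs
def altStart (msgs : List (List (String × String))) : Int :=
  (PySem.List.enumerate msgs 0).foldl
    (fun st p => if PySem.Dict.getD ⟨p.2⟩ "role" "" == "assistant" then p.1 + 1 else st) 0

lemma enumerate_append (xs ys : List (List (String × String))) (s : Int) :
    PySem.List.enumerate (xs ++ ys) s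
      = PySem.List.enumerate xs s ++ PySem.List.enumerate ys (s + xs.length) := by
  induction xs generalizing s with
  | nil => simp [PySem.List.enumerate_nil]
  | cons x xs ih =>
      simp [PySem.List.enumerate_cons, ih (s + 1)]
      ring_nf

lemma altStart_append (xs : List (List (String × String))) (m : List (String × String)) :
    altStart (xs ++ [m])
      = if PySem.Dict.getD ⟨m⟩ "role" "" == "assistant" then ((xs.length : Int) + 1)
        else altStart xs := by
  unfold altStart
  rw [enumerate_append, List.foldl_append]
  simp [PySem.List.enumerate_cons, PySem.List.enumerate_nil]

lemma scan_shift (xs : List (List (String × String))) (m : List (String × String))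
    (i : Nat) (hi : 1 ≤ i) :
    msgs2textScan (xs ++ [m]) (i + 1) = msgs2textScan xs i := by
  generalize hfuel : xs.length + 1 - i = fuel
  induction fuel generalizing i with
  | zero =>
      rw [msgs2textScan]
      conv_rhs => rw [msgs2textScan]
      have h2 : ¬ (i ≤ xs.length) := by omega
      simp [h2]
  | succ n ih =>
      rw [msgs2textScan]
      conv_rhs => rw [msgs2textScan]
      by_cases hle : i ≤ xs.length
      · have h1 : i + 1 ≤ (xs ++ [m]).length := by simp; omega
        have hidx : (xs ++ [m]).length - (i + 1) = xs.length - i := by simp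
        have hget : (xs ++ [m]).getD (xs.length - i) [] = xs.getD (xs.length - i) [] := by
          have hlt : xs.length - i < xs.length := by omega
          rw [List.getD_eq_getElem?_getD, List.getD_eq_getElem?_getD,
              List.getElem?_append_left hlt]
        rw [if_pos h1, if_pos hle, hidx, hget]
        split
        · rfl
        · exact ih (i + 1) (by omega) (by omega)
      · have h1 : ¬ (i + 1 ≤ (xs ++ [m]).length) := by simp; omega
        rw [if_neg h1, if_neg hle]

-- the core agreement: A's scan result (0 when the loop falls through) is B's fold value
lemma scan_eq_altStart (msgs : List (List (String × String))) :
    (match msgs2textScan msgs 1 with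
     | none => (0 : Int)
     | some s => (s : Int)) = altStart msgs := by
  induction msgs using List.reverseRecOn with
  | nil =>
      rw [msgs2textScan]
      simp [altStart, PySem.List.enumerate_nil]
  | append_singleton xs m ih =>
      rw [altStart_append]
      conv_lhs => rw [msgs2textScan]
      have h1 : 1 ≤ (xs ++ [m]).length := by simp
      have hidx : (xs ++ [m]).length - 1 = xs.length := by simp
      have hget : (xs ++ [m]).getD xs.length [] = m := by
        rw [List.getD_eq_getElem?_getD, List.getElem?_append_right (le_refl _)]
        simp
      rw [if_pos h1, hidx, hget]
      by_cases hr : (PySem.Dict.getD ⟨m⟩ "role" "" == "assistant") = true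
      · simp [hr]
      · rw [if_neg hr, if_neg hr, scan_shift xs m 1 (le_refl 1)]
        exact ih

lemma alt_eq (msgs : List (List (String × String))) :
    msgs2text_alt msgs
      = PySem.Str.join "\n"
          ((PySem.List.slice msgs (some (altStart msgs)) none).map
            (fun v => PySem.Dict.getD ⟨v⟩ "content" "")) := rfl

-- ===== VERDICT (by name: the statement is the Claim_ definition above) =====
theorem msgs2text_spec : Claim_equal_msgs2text := by
  intro msgs _ _
  unfold Spec_msgs2text
  rw [alt_eq]
  have h := scan_eq_altStart msgs
  unfold msgs2text
  cases hs : msgs2textScan msgs 1 with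
  | none =>
      rw [hs] at h
      rw [← h]
      simp [PySem.List.slice_zero_start, PySem.List.slice_none_none]
  | some s =>
      rw [hs] at h
      rw [← h]
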